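-- pv_equiv track=rewrite | github.com/SreehariU/PythonConcepts | function.py | check
-- ===== SOURCE A (Python) =====
-- def check(limit, oddoreven):
--     i=0
--     list1=[]
--     while (i<limit):
--         if(oddoreven=="odd" and i%2!=0):
--             list1.append(i)
--         elif(oddoreven=="even" and i%2==0):
--             list1.append(i)
--         i+=1
--     return(list1)
-- ===== SOURCE B (Python) =====
-- def check(limit, oddoreven):
--     if oddoreven == "odd":
--         return list(range(1, limit, 2))
--     if oddoreven == "even":
--         return list(range(0, limit, 2))
--     return []
-- ===== Notes on version B (the rewrite author's own statement) =====
-- stated objective: idiomatic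
-- what changed: B branches on oddoreven once and emits the arithmetic progression directly with range(start, limit, 2) (half-length traversal, no per-element modulo test), instead of scanning every integer below limit and filtering by i%2.
import Mathlib
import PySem

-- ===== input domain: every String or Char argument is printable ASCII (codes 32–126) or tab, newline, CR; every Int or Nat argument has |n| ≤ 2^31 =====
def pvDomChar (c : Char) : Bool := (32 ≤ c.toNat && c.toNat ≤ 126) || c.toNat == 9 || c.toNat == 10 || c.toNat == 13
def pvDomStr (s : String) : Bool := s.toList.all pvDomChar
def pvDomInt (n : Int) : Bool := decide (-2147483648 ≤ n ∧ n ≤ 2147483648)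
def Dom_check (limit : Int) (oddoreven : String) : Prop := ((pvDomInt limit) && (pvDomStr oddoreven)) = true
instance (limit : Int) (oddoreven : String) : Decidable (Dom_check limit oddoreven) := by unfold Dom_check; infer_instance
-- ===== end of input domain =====

-- B replaces A's scan-and-filter of every i < limit by one branch on oddoreven and a direct
-- step-2 range enumeration (idiomatic; no per-element modulo test).


-- ===== PORT A =====
-- the while loop of A: state is (i, list1)
def checkLoop (limit : Int) (oddoreven : String) (i : Int) (list1 : List Int) : List Int :=
  if i < limit then
    checkLoop limit oddoreven (i + 1)
      (if oddoreven = "odd" ∧ PySem.Int.mod i 2 ≠ 0 then list1 ++ [i]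
       else if oddoreven = "even" ∧ PySem.Int.mod i 2 = 0 then list1 ++ [i]
       else list1)
  else list1
termination_by (limit - i).toNat
decreasing_by omega

def check (limit : Int) (oddoreven : String) : List Int :=
  checkLoop limit oddoreven 0 []

-- ===== PORT B =====
def check_alt (limit : Int) (oddoreven : String) : List Int :=
  if oddoreven = "odd" then PySem.List.pyRange 1 limit 2
  else if oddoreven = "even" then PySem.List.pyRange 0 limit 2
  else []

-- ===== PRECONDITION & SPEC =====
def Spec_check (limit : Int) (oddoreven : String) (out : List Int) : Prop := out = check_alt limit oddoreven
instance (limit : Int) (oddoreven : String) (out : List Int) : Decidable (Spec_check limit oddoreven out) := by unfold Spec_check; infer_instance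

-- ===== CLAIM (what is proved, stated in full; the proofs are below) =====
def Claim_equal_check : Prop := ∀ (limit : Int) (oddoreven : String), Dom_check limit oddoreven → Spec_check limit oddoreven (check limit oddoreven)

-- ===== LEMMAS AND PROOFS =====

theorem pyRange_two_nil {a b : Int} (h : b ≤ a) : PySem.List.pyRange a b 2 = [] := by
  rw [PySem.List.pyRange_of_pos a b (by norm_num)]
  rw [if_neg (by omega)]
  simp

theorem pyRange_two_cons {a b : Int} (h : a < b) :
    PySem.List.pyRange a b 2 = a :: PySem.List.pyRange (a + 2) b 2 := by
  rw [PySem.List.pyRange_of_pos a b (by norm_num),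
      PySem.List.pyRange_of_pos (a + 2) b (by norm_num)]
  have hn : ((b - a + 2 - 1) / 2).toNat
      = (if a + 2 < b then ((b - (a + 2) + 2 - 1) / 2).toNat else 0) + 1 := by
    split_ifs <;> omega
  rw [if_pos h, hn, List.range_succ_eq_map, List.map_cons, List.map_map]
  norm_num [Function.comp_def]
  intro k _
  ring

-- the value the loop appends from position i on, as a step-2 range
def tailFrom (oddoreven : String) (i limit : Int) : List Int :=
  if oddoreven = "odd" then PySem.List.pyRange (if i % 2 = 0 then i + 1 else i) limit 2
  else if oddoreven = "even" then PySem.List.pyRange (if i % 2 = 0 then i else i + 1) limit 2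
  else []

theorem checkLoop_eq (limit : Int) (oddoreven : String) :
    ∀ n i list1, (limit - i).toNat = n →
      checkLoop limit oddoreven i list1 = list1 ++ tailFrom oddoreven i limit := by
  intro n
  induction n with
  | zero =>
    intro i list1 h
    rw [checkLoop, if_neg (by omega)]
    unfold tailFrom
    split_ifs <;>
      simp [pyRange_two_nil (show limit ≤ i by omega),
            pyRange_two_nil (show limit ≤ i + 1 by omega)]
  | succ n ih =>
    intro i list1 h
    rw [checkLoop, if_pos (by omega), ih (i + 1) _ (by omega)]
    have hlt : i < limit := by omega
    have h2 : i + 1 + 1 = i + 2 := by ring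
    by_cases ho : oddoreven = "odd"
    · subst ho
      rcases Int.emod_two_eq i with hp | hp
      · have hq : (i + 1) % 2 = 1 := by omega
        simp [tailFrom, hp, hq]
      · have hq : (i + 1) % 2 = 0 := by omega
        simp [tailFrom, hp, hq, pyRange_two_cons hlt, h2]
    · by_cases he : oddoreven = "even"
      · subst he
        rcases Int.emod_two_eq i with hp | hp
        · have hq : (i + 1) % 2 = 1 := by omega
          simp [tailFrom, hp, hq, ho, pyRange_two_cons hlt, h2]
        · have hq : (i + 1) % 2 = 0 := by omega
          simp [tailFrom, hp, hq, ho]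
      · simp [tailFrom, ho, he]

-- ===== VERDICT (by name: the statement is the Claim_ definition above) =====
theorem check_spec : Claim_equal_check := by
  intro limit oddoreven _
  unfold Spec_check check check_alt
  rw [checkLoop_eq limit oddoreven _ 0 [] rfl]
  unfold tailFrom
  norm_num
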